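-- pv_equiv track=rewrite | github.com/xero7689/xStockSystem | crawler/crawler.py | year_generator
-- ===== SOURCE A (Python) =====
-- def year_generator(start_year=2010, end_year=2017):
--     dates = []
--     for y in range(start_year, end_year+1):
--         year = str(y)
--         for m in range(1, 12+1):
--             month = str(m)
--             if m < 10:
--                 month = '0{}'.format(month)
--             date = '{}{}01'.format(year, month)
--             dates.append(date)
--     return dates
-- ===== SOURCE B (Python) =====
-- def year_generator(start_year=2010, end_year=2017):
--     total = (end_year - start_year + 1) * 12
--     dates = []
--     for i in range(total):
--         y, m = divmod(i, 12)
--         dates.append(str(start_year + y) + format(m + 1, '02d') + '01')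
--     return dates
-- ===== Notes on version B (the rewrite author's own statement) =====
-- stated objective: alternative
-- what changed: Replaced the nested year/month loops with a single flat loop over a precomputed index range, recovering year and month by divmod(i, 12) and zero-padding the month with format(m+1,'02d').
import Mathlib
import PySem

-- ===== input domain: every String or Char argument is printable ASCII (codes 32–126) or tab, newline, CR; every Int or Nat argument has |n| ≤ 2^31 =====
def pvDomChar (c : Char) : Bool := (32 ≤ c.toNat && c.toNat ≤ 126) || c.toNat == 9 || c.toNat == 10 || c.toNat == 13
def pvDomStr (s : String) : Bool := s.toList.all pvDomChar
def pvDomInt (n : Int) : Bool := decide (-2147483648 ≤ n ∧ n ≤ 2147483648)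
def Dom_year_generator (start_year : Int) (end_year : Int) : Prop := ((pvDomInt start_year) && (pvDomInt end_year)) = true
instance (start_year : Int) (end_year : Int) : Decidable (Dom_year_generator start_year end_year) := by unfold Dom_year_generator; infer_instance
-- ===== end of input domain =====

-- B replaces the nested year/month loops with one flat loop over a precomputed
-- index range, recovering year and month by divmod(i, 12) (objective: alternative).

-- ===== PORT A =====
def year_generator (start_year : Int) (end_year : Int) : List String :=
  (PySem.List.pyRange start_year (end_year + 1) 1).foldl (fun dates y =>
    let year := PySem.Int.toStr y
    (PySem.List.pyRange 1 (12 + 1) 1).foldl (fun dates m =>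
      let month := PySem.Int.toStr m
      let month := if m < 10 then "0" ++ month else month
      let date := year ++ month ++ "01"
      dates ++ [date]) dates) []

-- ===== PORT B =====
def year_generator_alt (start_year : Int) (end_year : Int) : List String :=
  let total := (end_year - start_year + 1) * 12
  (PySem.List.pyRange 0 total 1).foldl (fun dates i =>
    let y := PySem.Int.floordiv i 12
    let m := PySem.Int.mod i 12
    -- format(m+1, '02d'): m+1 is in 1..12, so '02d' pads a single digit with one '0' (exact here)
    let month := if m + 1 < 10 then "0" ++ PySem.Int.toStr (m + 1) else PySem.Int.toStr (m + 1)
    dates ++ [PySem.Int.toStr (start_year + y) ++ month ++ "01"]) []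

-- ===== PRECONDITION & SPEC =====
def Spec_year_generator (start_year : Int) (end_year : Int) (out : List String) : Prop := out = year_generator_alt start_year end_year
instance (start_year : Int) (end_year : Int) (out : List String) : Decidable (Spec_year_generator start_year end_year out) := by unfold Spec_year_generator; infer_instance

-- ===== CLAIM (what is proved, stated in full; the proofs are below) =====
def Claim_equal_year_generator : Prop := ∀ (start_year : Int) (end_year : Int), Dom_year_generator start_year end_year → Spec_year_generator start_year end_year (year_generator start_year end_year)

-- ===== LEMMAS AND PROOFS =====

-- per-cell bodies of the two loops, after the append-folds are turned into map/flatMap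
def pvCellA (y m : Int) : String :=
  PySem.Int.toStr y ++ (if m < 10 then "0" ++ PySem.Int.toStr m else PySem.Int.toStr m) ++ "01"

def pvCellB (s i : Int) : String :=
  PySem.Int.toStr (s + PySem.Int.floordiv i 12) ++
    (if PySem.Int.mod i 12 + 1 < 10 then "0" ++ PySem.Int.toStr (PySem.Int.mod i 12 + 1)
     else PySem.Int.toStr (PySem.Int.mod i 12 + 1)) ++ "01"

theorem pvA_eq (s e : Int) :
    year_generator s e =
      (PySem.List.pyRange s (e + 1) 1).flatMap
        (fun y => (PySem.List.pyRange 1 13 1).map (pvCellA y)) := by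
  unfold year_generator
  simp only [PySem.List.foldl_append_singleton_eq_map, PySem.List.foldl_append_eq_flatMap,
    List.nil_append]
  norm_num
  apply List.flatMap_congr
  intro y _
  apply List.map_congr_left
  intro m _
  simp [pvCellA, String.append_assoc]


theorem pvB_eq (s e : Int) :
    year_generator_alt s e =
      (PySem.List.pyRange 0 ((e - s + 1) * 12) 1).map (pvCellB s) := by
  unfold year_generator_alt
  simp only [PySem.List.foldl_append_singleton_eq_map]
  rfl

theorem pvRangeTwelve (c : Int) :
    PySem.List.pyRange c (c + 12) 1 = (List.range 12).map (fun j : Nat => c + (j : Int)) := by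
  rw [PySem.List.pyRange_one]
  norm_num
  rfl

theorem pvCell_agree (s : Int) (k : Int) (j : Nat) (hj : j < 12) :
    pvCellB s (k * 12 + j) = pvCellA (s + k) (1 + j) := by
  have hd : PySem.Int.floordiv (k * 12 + j) 12 = k := by
    rw [PySem.Int.floordiv_eq_ediv_of_pos (by norm_num : (0:Int) < 12)]
    omega
  have hm : PySem.Int.mod (k * 12 + j) 12 = (j : Int) := by
    rw [PySem.Int.mod_eq_emod_of_pos (by norm_num : (0:Int) < 12)]
    omega
  simp only [pvCellA, pvCellB, hd, hm]
  norm_num [add_comm]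

theorem pvMain (s : Int) (k : Nat) :
    (PySem.List.pyRange s (s + k) 1).flatMap
        (fun y => (PySem.List.pyRange 1 13 1).map (pvCellA y)) =
      (PySem.List.pyRange 0 ((k : Int) * 12) 1).map (pvCellB s) := by
  induction k with
  | zero => simp [PySem.List.pyRange_one_eq_nil]
  | succ n ih =>
    have h1 : PySem.List.pyRange s (s + ((n + 1 : Nat) : Int)) 1
        = PySem.List.pyRange s (s + n) 1 ++ [s + n] := by
      have := PySem.List.pyRange_one_succ_right (a := s) (b := s + n) (by omega)
      simpa [add_assoc] using this
    have hb : (((n + 1 : Nat) : Int)) * 12 = (n : Int) * 12 + 12 := by push_cast; ring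
    have h2 : PySem.List.pyRange 0 ((n : Int) * 12 + 12) 1
        = PySem.List.pyRange 0 ((n : Int) * 12) 1
          ++ PySem.List.pyRange ((n : Int) * 12) ((n : Int) * 12 + 12) 1 := by
      apply PySem.List.pyRange_one_append <;> omega
    rw [h1, hb, h2, List.flatMap_append, List.map_append, ih]
    congr 1
    have h4 : PySem.List.pyRange 1 13 1 = (List.range 12).map (fun j : Nat => 1 + (j : Int)) := by
      have := pvRangeTwelve 1
      norm_num at this
      exact this
    rw [pvRangeTwelve ((n : Int) * 12), h4]
    simp only [List.flatMap_cons, List.flatMap_nil, List.append_nil, List.map_map]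
    apply List.map_congr_left
    intro j hj
    simp only [Function.comp]
    exact (pvCell_agree s n j (List.mem_range.mp hj)).symm

-- ===== VERDICT (by name: the statement is the Claim_ definition above) =====
theorem year_generator_spec : Claim_equal_year_generator := by
  intro s e _
  unfold Spec_year_generator
  rw [pvA_eq, pvB_eq]
  by_cases h : e + 1 ≤ s
  · rw [PySem.List.pyRange_one_eq_nil (a := s) (b := e + 1) h,
      PySem.List.pyRange_one_eq_nil (a := 0) (b := (e - s + 1) * 12) (by omega)]
    simp
  · have hk : e + 1 = s + ((e + 1 - s).toNat : Int) := by omega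
    have hk2 : (e - s + 1) * 12 = ((e + 1 - s).toNat : Int) * 12 := by
      have h' : (e - s + 1) = ((e + 1 - s).toNat : Int) := by omega
      rw [h']
    rw [hk, hk2]
    exact pvMain s (e + 1 - s).toNat
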